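-- pv_equiv track=rewrite | github.com/thenuwij/UniVise | backend/app/routers/flexibility_filtering.py | are_related_faculties_improved
-- ===== SOURCE A (Python) =====
-- def are_related_faculties_improved(faculty1: str, faculty2: str) -> bool:
--     """
--     Check if two faculties are related/similar.
--
--     Improved version with more comprehensive relationships.
--     """
--     if not faculty1 or not faculty2:
--         return False
--
--     # Normalize names
--     f1 = faculty1.lower().strip()
--     f2 = faculty2.lower().strip()
--
--     if f1 == f2:
--         return True
--
--     # Define faculty relationship groups
--     related_groups = [
--         # Engineering & Technology
--         {'engineering', 'computer science', 'information technology', 'built environment'},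
--
--         # Sciences
--         {'science', 'mathematics', 'physics', 'chemistry', 'biology'},
--
--         # Business & Commerce
--         {'business', 'commerce', 'economics', 'management'},
--
--         # Arts & Humanities
--         {'arts', 'humanities', 'social sciences', 'education'},
--
--         # Health & Medicine
--         {'medicine', 'health', 'nursing', 'public health'},
--
--         # Law & Legal
--         {'law', 'legal studies'},
--     ]
--
--     # Check if both faculties are in same group
--     for group in related_groups:
--         f1_in_group = any(keyword in f1 for keyword in group)
--         f2_in_group = any(keyword in f2 for keyword in group)
--         if f1_in_group and f2_in_group:
--             return True
--
--     return False
-- ===== SOURCE B (Python) =====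
-- RELATED_GROUPS = [
--     ['engineering', 'computer science', 'information technology', 'built environment'],
--     ['science', 'mathematics', 'physics', 'chemistry', 'biology'],
--     ['business', 'commerce', 'economics', 'management'],
--     ['arts', 'humanities', 'social sciences', 'education'],
--     ['medicine', 'health', 'nursing', 'public health'],
--     ['law', 'legal studies'],
-- ]
--
-- # precompiled flat keyword -> group-bit table
-- KEYWORD_BITS = [(kw, 1 << i) for i, group in enumerate(RELATED_GROUPS) for kw in group]
--
--
-- def _mask(f):
--     m = 0
--     for kw, bit in KEYWORD_BITS:
--         if kw in f:
--             m |= bit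
--     return m
--
--
-- def are_related_faculties_improved(faculty1: str, faculty2: str) -> bool:
--     if not faculty1 or not faculty2:
--         return False
--     f1 = faculty1.lower().strip()
--     f2 = faculty2.lower().strip()
--     if f1 == f2:
--         return True
--     return (_mask(f1) & _mask(f2)) != 0
-- ===== Notes on version B (the rewrite author's own statement) =====
-- stated objective: alternative
-- what changed: Replaces A's nested per-group loop over keyword sets (testing both strings in each group with an early return) by a precompiled flat keyword->group-bit table: one flat accumulator pass per string builds an integer bitmask of matched groups, and relatedness is decided by a single bitwise AND test mask1 & mask2 != 0.
import Mathlib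
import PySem

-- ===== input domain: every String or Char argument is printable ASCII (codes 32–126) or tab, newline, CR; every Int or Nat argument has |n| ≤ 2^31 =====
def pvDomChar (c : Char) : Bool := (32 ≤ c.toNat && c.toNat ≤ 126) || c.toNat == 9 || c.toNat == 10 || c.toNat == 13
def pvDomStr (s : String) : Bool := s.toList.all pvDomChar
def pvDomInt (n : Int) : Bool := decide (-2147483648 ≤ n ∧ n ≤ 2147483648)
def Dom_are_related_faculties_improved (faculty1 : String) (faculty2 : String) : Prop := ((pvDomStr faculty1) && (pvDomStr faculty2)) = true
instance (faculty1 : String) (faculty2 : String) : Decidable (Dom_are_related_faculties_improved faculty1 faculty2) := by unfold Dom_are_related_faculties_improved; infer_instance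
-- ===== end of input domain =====

-- ===== PORT A =====

-- B replaces A's nested per-group scan by a precompiled flat keyword->group-bit table:
-- one bitmask per string, relatedness = (mask1 &&& mask2) ≠ 0; same cost, alternative algorithm.
-- No Pre_: A is total.

-- ===== PORT A =====
-- the literal related_groups list of A (sets of keywords; only `any` membership is used,
-- which is order-independent, so Set.ofList of the literal order is exact)
def pvRelatedGroups : List (PySem.Set String) :=
  [PySem.Set.ofList ["engineering", "computer science", "information technology", "built environment"],
   PySem.Set.ofList ["science", "mathematics", "physics", "chemistry", "biology"],
   PySem.Set.ofList ["business", "commerce", "economics", "management"],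
   PySem.Set.ofList ["arts", "humanities", "social sciences", "education"],
   PySem.Set.ofList ["medicine", "health", "nursing", "public health"],
   PySem.Set.ofList ["law", "legal studies"]]

-- A's for-loop over the groups, with its early return
def pvLoopA (f1 f2 : String) : List (PySem.Set String) → Bool
  | [] => false
  | g :: rest =>
      let f1_in_group := g.any (fun keyword => PySem.Str.isIn keyword f1)
      let f2_in_group := g.any (fun keyword => PySem.Str.isIn keyword f2)
      if f1_in_group && f2_in_group then true else pvLoopA f1 f2 rest

def are_related_faculties_improved (faculty1 : String) (faculty2 : String) : Bool :=
  if faculty1 == "" || faculty2 == "" then false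
  else
    let f1 := PySem.Str.strip (PySem.Str.lower faculty1)
    let f2 := PySem.Str.strip (PySem.Str.lower faculty2)
    if f1 == f2 then true
    else pvLoopA f1 f2 pvRelatedGroups

-- ===== PORT B =====
-- Source B's RELATED_GROUPS (plain lists of keywords)
def pvGroupsB : List (List String) :=
  [["engineering", "computer science", "information technology", "built environment"],
   ["science", "mathematics", "physics", "chemistry", "biology"],
   ["business", "commerce", "economics", "management"],
   ["arts", "humanities", "social sciences", "education"],
   ["medicine", "health", "nursing", "public health"],
   ["law", "legal studies"]]

-- Source B's comprehension building KEYWORD_BITS: (kw, 1 << i) over enumerated groups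
def pvFlatBits : List (List String) → Nat → List (String × Nat)
  | [], _ => []
  | g :: rest, i => g.map (fun kw => (kw, 2 ^ i)) ++ pvFlatBits rest (i + 1)

def pvKeywordBits : List (String × Nat) := pvFlatBits pvGroupsB 0

-- Source B's _mask loop: m = 0; for kw, bit in KEYWORD_BITS: if kw in f: m |= bit
def pvMask (f : String) : List (String × Nat) → Nat → Nat
  | [], m => m
  | (kw, bit) :: rest, m =>
      pvMask f rest (if PySem.Str.isIn kw f then m ||| bit else m)

def are_related_faculties_improved_alt (faculty1 : String) (faculty2 : String) : Bool :=
  if faculty1 == "" || faculty2 == "" then false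
  else
    let f1 := PySem.Str.strip (PySem.Str.lower faculty1)
    let f2 := PySem.Str.strip (PySem.Str.lower faculty2)
    if f1 == f2 then true
    else (pvMask f1 pvKeywordBits 0 &&& pvMask f2 pvKeywordBits 0) != 0

-- ===== PRECONDITION & SPEC =====
def Spec_are_related_faculties_improved (faculty1 : String) (faculty2 : String) (out : Bool) : Prop := out = are_related_faculties_improved_alt faculty1 faculty2
instance (faculty1 : String) (faculty2 : String) (out : Bool) : Decidable (Spec_are_related_faculties_improved faculty1 faculty2 out) := by unfold Spec_are_related_faculties_improved; infer_instance

-- ===== CLAIM =====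
def Claim_equal_are_related_faculties_improved : Prop := ∀ (faculty1 : String) (faculty2 : String), Dom_are_related_faculties_improved faculty1 faculty2 → Spec_are_related_faculties_improved faculty1 faculty2 (are_related_faculties_improved faculty1 faculty2)

-- ===== LEMMAS AND PROOFS =====

-- the keyword sets of A evaluate to exactly the plain keyword lists of B
theorem pvRelatedGroups_eq : pvRelatedGroups = pvGroupsB := by decide

-- A's loop is an `any` over the groups
theorem pvLoopA_eq_any (f1 f2 : String) (gs : List (PySem.Set String)) :
    pvLoopA f1 f2 gs
      = gs.any (fun g => (g.any (fun k => PySem.Str.isIn k f1))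
                      && (g.any (fun k => PySem.Str.isIn k f2))) := by
  induction gs with
  | nil => rfl
  | cons g rest ih =>
      simp only [pvLoopA, List.any_cons, ih]
      cases hc : ((g.any fun keyword => PySem.Str.isIn keyword f1) && g.any fun keyword => PySem.Str.isIn keyword f2) <;>
        simp only [Bool.false_or, Bool.true_or, if_true, Bool.false_eq_true, if_false]

-- accumulator-free value of Source B's mask loop
def pvMaskV (f : String) : List (String × Nat) → Nat
  | [] => 0
  | (kw, bit) :: rest => (if PySem.Str.isIn kw f then bit else 0) ||| pvMaskV f rest

theorem pvMask_eq_or (f : String) (L : List (String × Nat)) (m : Nat) :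
    pvMask f L m = m ||| pvMaskV f L := by
  induction L generalizing m with
  | nil => simp [pvMask, pvMaskV]
  | cons p rest ih =>
      obtain ⟨kw, bit⟩ := p
      simp only [pvMask, pvMaskV, ih]
      split_ifs <;> simp [Nat.or_assoc]

theorem pvMaskV_append_group (f : String) (g : List String) (b : Nat) (R : List (String × Nat)) :
    pvMaskV f (g.map (fun kw => (kw, b)) ++ R)
      = (if g.any (fun kw => PySem.Str.isIn kw f) then b else 0) ||| pvMaskV f R := by
  induction g with
  | nil => simp
  | cons k g ih =>
      cases hk : PySem.Chars.isIn k.toList f.toList <;>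
        by_cases hg : ∃ x ∈ g, PySem.Chars.isIn x.toList f.toList = true <;>
          simp [pvMaskV, ih, hk, hg, Nat.or_self_left]

-- which bits the mask of a flattened group list sets
theorem testBit_pvMaskV_flat (f : String) (gs : List (List String)) (i j : Nat) :
    (pvMaskV f (pvFlatBits gs i)).testBit j = true
      ↔ ∃ (k : Nat) (h : k < gs.length),
          j = i + k ∧ gs[k].any (fun kw => PySem.Str.isIn kw f) = true := by
  induction gs generalizing i with
  | nil =>
      simp [pvFlatBits, pvMaskV, Nat.zero_testBit]
  | cons g rest ih =>
      rw [pvFlatBits, pvMaskV_append_group, Nat.testBit_or, Bool.or_eq_true, ih]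
      constructor
      · rintro (h | ⟨k, hk, rfl, hm⟩)
        · by_cases hg : g.any (fun kw => PySem.Str.isIn kw f)
          · rw [if_pos hg, Nat.testBit_two_pow, decide_eq_true_iff] at h
            exact ⟨0, by simp, by omega, by simpa [← h] using hg⟩
          · rw [if_neg hg] at h; simp [Nat.zero_testBit] at h
        · exact ⟨k + 1, by simpa using Nat.succ_lt_succ hk, by omega, by simpa using hm⟩
      · rintro ⟨k, hk, rfl, hm⟩
        cases k with
        | zero =>
            left
            have hg : g.any (fun kw => PySem.Str.isIn kw f) = true := by simpa using hm
            rw [if_pos hg, Nat.testBit_two_pow]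
            simp
        | succ k =>
            right
            exact ⟨k, by simpa using Nat.lt_of_succ_lt_succ hk, by omega, by simpa using hm⟩

-- (m1 &&& m2) ≠ 0 iff some bit is set in both
theorem land_ne_zero_iff (m1 m2 : Nat) :
    (m1 &&& m2 ≠ 0) ↔ ∃ j, m1.testBit j = true ∧ m2.testBit j = true := by
  constructor
  · intro h
    obtain ⟨j, hj⟩ := Nat.exists_testBit_of_ne_zero h
    rw [Nat.testBit_and, Bool.and_eq_true] at hj
    exact ⟨j, hj⟩
  · rintro ⟨j, h1, h2⟩ h0
    have := congrArg (fun n => n.testBit j) h0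
    simp [Nat.testBit_and, h1, h2, Nat.zero_testBit] at this

-- the core: A's loop equals B's bitmask test
theorem pvLoop_eq_mask (f1 f2 : String) :
    pvLoopA f1 f2 pvRelatedGroups
      = ((pvMask f1 pvKeywordBits 0 &&& pvMask f2 pvKeywordBits 0) != 0) := by
  rw [pvLoopA_eq_any, Bool.eq_iff_iff, bne_iff_ne]
  unfold pvKeywordBits
  rw [pvMask_eq_or, pvMask_eq_or, Nat.zero_or, Nat.zero_or, land_ne_zero_iff]
  simp only [List.any_eq_true]
  constructor
  · rintro ⟨g, hg, h12⟩
    rw [pvRelatedGroups_eq, List.mem_iff_getElem] at hg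
    obtain ⟨k, hk, rfl⟩ := hg
    rw [Bool.and_eq_true] at h12
    exact ⟨0 + k,
      (testBit_pvMaskV_flat f1 pvGroupsB 0 _).2 ⟨k, hk, rfl, h12.1⟩,
      (testBit_pvMaskV_flat f2 pvGroupsB 0 _).2 ⟨k, hk, rfl, h12.2⟩⟩
  · rintro ⟨j, h1, h2⟩
    obtain ⟨k, hk, rfl, ha⟩ := (testBit_pvMaskV_flat f1 pvGroupsB 0 j).1 h1
    obtain ⟨k', hk', heq, hb⟩ := (testBit_pvMaskV_flat f2 pvGroupsB 0 _).1 h2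
    have : k = k' := by omega
    subst this
    refine ⟨pvGroupsB[k], ?_, by rw [Bool.and_eq_true]; exact ⟨ha, hb⟩⟩
    rw [pvRelatedGroups_eq]
    exact List.getElem_mem hk

-- ===== VERDICT =====
theorem are_related_faculties_improved_spec : Claim_equal_are_related_faculties_improved := by
  intro faculty1 faculty2 _
  unfold Spec_are_related_faculties_improved
  simp only [are_related_faculties_improved, are_related_faculties_improved_alt,
    pvLoop_eq_mask]
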